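-- pv_equiv track=rewrite | github.com/ecfm/ml-best-practices | templates/claims-tracker/generate_evidence_graph.py | find_roots_and_leaves
-- ===== SOURCE A (Python) =====
-- def find_roots_and_leaves(all_claims, supports_edges):
--     """Find root claims (supported by others, support nothing themselves) and
--     leaf claims (support others but nothing supports them)."""
--     all_ids = set(all_claims.keys())
--
--     # Claims that appear as targets of supports edges
--     supported_by_others = set()
--     for cid, targets in supports_edges.items():
--         for t in targets:
--             supported_by_others.add(t)
--
--     # Claims that support something
--     supports_something = set(supports_edges.keys())
--
--     # Roots: supported by others but don't support anything further
--     # (top of the argument -- thesis-level claims)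
--     roots = supported_by_others - supports_something
--
--     # Also add claims that aren't referenced at all in supports
--     # (could be the ultimate thesis claims not yet connected)
--     unreferenced = all_ids - supported_by_others - supports_something
--     if unreferenced:
--         roots.update(cid for cid in unreferenced if all_claims[cid]["type"] in ("interpretive", "logical"))
--
--     # Leaves: support something but nothing supports them
--     # (bottom of the argument -- raw evidence)
--     leaves = supports_something - supported_by_others
--
--     # Also claims with no supports and no one supporting them (isolated)
--     isolated = all_ids - supported_by_others - supports_something
--
--     return roots, leaves, isolated
-- ===== SOURCE B (Python) =====
-- def find_roots_and_leaves(all_claims, supports_edges):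
--     """Per-node state machine: one flag record [has_incoming_support, supports_something]
--     is kept per claim id in an insertion-ordered dict, filled by scanning the edges,
--     then each id is classified from its own flags -- no set algebra, no membership
--     tests against global sets."""
--     flags = {}  # cid -> [is supported by others, supports something]
--     for targets in supports_edges.values():
--         for t in targets:
--             flags.setdefault(t, [False, False])[0] = True
--     for cid in supports_edges:
--         flags.setdefault(cid, [False, False])[1] = True
--     for cid in all_claims:
--         flags.setdefault(cid, [False, False])
--     roots, leaves, isolated = set(), set(), set()
--     for cid, (supported, supports) in flags.items():
--         if supported and not supports:
--             roots.add(cid)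
--         elif supports and not supported:
--             leaves.add(cid)
--         elif not supported and not supports:
--             isolated.add(cid)
--             if all_claims[cid]["type"] in ("interpretive", "logical"):
--                 roots.add(cid)
--     return roots, leaves, isolated
-- ===== Notes on version B (the rewrite author's own statement) =====
-- stated objective: alternative
-- what changed: Replaces A's set algebra (two global sets plus three set differences and a conditional comprehension) by a per-node state machine: an insertion-ordered dict of [supported, supports] flag records filled in one scan of the edges, from which each id is classified by its own flags with no membership tests against global sets.
import Mathlib
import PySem

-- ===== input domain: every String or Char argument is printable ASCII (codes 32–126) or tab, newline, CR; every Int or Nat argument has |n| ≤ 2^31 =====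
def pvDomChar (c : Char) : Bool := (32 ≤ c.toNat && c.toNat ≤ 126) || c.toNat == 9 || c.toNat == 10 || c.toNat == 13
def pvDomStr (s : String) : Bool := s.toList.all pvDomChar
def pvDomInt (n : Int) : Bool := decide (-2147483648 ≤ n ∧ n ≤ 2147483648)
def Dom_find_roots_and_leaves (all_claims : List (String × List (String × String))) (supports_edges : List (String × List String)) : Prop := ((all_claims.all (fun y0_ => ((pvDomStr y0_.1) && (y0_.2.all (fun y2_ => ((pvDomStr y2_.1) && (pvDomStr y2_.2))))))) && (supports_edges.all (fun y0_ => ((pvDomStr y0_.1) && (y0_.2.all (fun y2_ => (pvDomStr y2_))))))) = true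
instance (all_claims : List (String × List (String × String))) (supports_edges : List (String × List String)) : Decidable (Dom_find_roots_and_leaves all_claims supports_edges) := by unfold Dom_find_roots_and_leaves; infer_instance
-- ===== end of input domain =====

-- B replaces A's set algebra (two global sets, three set differences, a conditional
-- comprehension) by a per-node flag record [supported, supports] kept in an
-- insertion-ordered dict and a classification loop reading only each node's own flags:
-- same cost, a different data structure (objective: alternative).

-- ===== PORT A =====
-- shared helper: all_claims[cid]["type"] in ("interpretive", "logical") — the same
-- expression occurs verbatim in both Pythons (exact under Pre_, which rules out the
-- KeyError of a missing "type" key; the outer lookup always hits under Pre_)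
def pvClaimTyped (all_claims : List (String × List (String × String))) (cid : String) : Bool :=
  let ty := (PySem.Dict.mk ((PySem.Dict.mk all_claims).getD cid [])).getD "type" ""
  ty == "interpretive" || ty == "logical"

def find_roots_and_leaves (all_claims : List (String × List (String × String))) (supports_edges : List (String × List String)) : List String × List String × List String :=
  let all_ids : PySem.Set String := PySem.Set.ofList (all_claims.map Prod.fst)
  -- for cid, targets in supports_edges.items(): for t in targets: supported_by_others.add(t)
  let supported_by_others : PySem.Set String :=
    supports_edges.foldl (fun s p => p.2.foldl PySem.Set.add s) PySem.Set.empty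
  let supports_something : PySem.Set String := PySem.Set.ofList (supports_edges.map Prod.fst)
  let roots := PySem.Set.diff supported_by_others supports_something
  let unreferenced := PySem.Set.diff (PySem.Set.diff all_ids supported_by_others) supports_something
  let roots := if unreferenced.isEmpty then roots
    else PySem.Set.update roots (unreferenced.filter (fun cid => pvClaimTyped all_claims cid))
  let leaves := PySem.Set.diff supports_something supported_by_others
  let isolated := PySem.Set.diff (PySem.Set.diff all_ids supported_by_others) supports_something
  (roots, leaves, isolated)

-- ===== PORT B =====
-- hand ports of flags.setdefault(x, [False, False])[k] = True (exact: key present →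
-- the entry's flag k is set in place, key absent → the record is appended with flag k set)
def pvMarkIn : List (String × (Bool × Bool)) → String → List (String × (Bool × Bool))
  | [], t => [(t, (true, false))]
  | (k, v) :: rest, t => if k == t then (k, (true, v.2)) :: rest else (k, v) :: pvMarkIn rest t

def pvMarkOut : List (String × (Bool × Bool)) → String → List (String × (Bool × Bool))
  | [], t => [(t, (false, true))]
  | (k, v) :: rest, t => if k == t then (k, (v.1, true)) :: rest else (k, v) :: pvMarkOut rest t

-- flags.setdefault(cid, [False, False]) used only for its presence effect (exact)
def pvEnsure (d : List (String × (Bool × Bool))) (t : String) : List (String × (Bool × Bool)) :=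
  if (d.map Prod.fst).contains t then d else d ++ [(t, (false, false))]

def find_roots_and_leaves_alt (all_claims : List (String × List (String × String))) (supports_edges : List (String × List String)) : List String × List String × List String :=
  -- flags is built by three sequential passes over one dict; each pass feeds the next:
  -- 1. for targets in supports_edges.values(): for t in targets: flags.setdefault(t, [F,F])[0] = True
  -- 2. for cid in supports_edges: flags.setdefault(cid, [F,F])[1] = True
  -- 3. for cid in all_claims: flags.setdefault(cid, [F,F])
  -- then: for cid, (supported, supports) in flags.items(): classify by the record's flags
  ((all_claims.map Prod.fst).foldl pvEnsure
    ((supports_edges.map Prod.fst).foldl pvMarkOut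
      (supports_edges.foldl (fun d p => p.2.foldl pvMarkIn d) []))).foldl (fun acc e =>
    if e.2.1 && !e.2.2 then (PySem.Set.add acc.1 e.1, acc.2.1, acc.2.2)
    else if e.2.2 && !e.2.1 then (acc.1, PySem.Set.add acc.2.1 e.1, acc.2.2)
    else if !e.2.1 && !e.2.2 then
      ((if pvClaimTyped all_claims e.1 then PySem.Set.add acc.1 e.1 else acc.1), acc.2.1,
        PySem.Set.add acc.2.2 e.1)
    else acc) (PySem.Set.empty, PySem.Set.empty, PySem.Set.empty)

-- ===== PRECONDITION & SPEC =====
-- Pre_ excludes exactly the inputs where Python A raises a KeyError: a claim id that is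
-- referenced by no supports edge and supports nothing whose claim dict lacks a "type" key.
def Pre_find_roots_and_leaves (all_claims : List (String × List (String × String))) (supports_edges : List (String × List String)) : Prop :=
  ∀ p ∈ all_claims, p.1 ∉ supports_edges.flatMap Prod.snd → p.1 ∉ supports_edges.map Prod.fst →
    "type" ∈ ((PySem.Dict.mk all_claims).getD p.1 []).map Prod.fst
instance (all_claims : List (String × List (String × String))) (supports_edges : List (String × List String)) : Decidable (Pre_find_roots_and_leaves all_claims supports_edges) := by unfold Pre_find_roots_and_leaves; infer_instance

def pvWitness_find_roots_and_leaves : (List (String × List (String × String))) × (List (String × List String)) :=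
  ([("a", [("type", "interpretive")]), ("b", [("type", "evidence")])], [("c", ["b"])])

def Spec_find_roots_and_leaves (all_claims : List (String × List (String × String))) (supports_edges : List (String × List String)) (out : List String × List String × List String) : Prop := out = find_roots_and_leaves_alt all_claims supports_edges
instance (all_claims : List (String × List (String × String))) (supports_edges : List (String × List String)) (out : List String × List String × List String) : Decidable (Spec_find_roots_and_leaves all_claims supports_edges out) := by unfold Spec_find_roots_and_leaves; infer_instance

-- ===== CLAIM (what is proved, stated in full; the proofs are below) =====
def Claim_equal_find_roots_and_leaves : Prop := ∀ (all_claims : List (String × List (String × String))) (supports_edges : List (String × List String)), Dom_find_roots_and_leaves all_claims supports_edges → Pre_find_roots_and_leaves all_claims supports_edges → Spec_find_roots_and_leaves all_claims supports_edges (find_roots_and_leaves all_claims supports_edges)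

-- ===== LEMMAS AND PROOFS =====

-- A's edge pass is set(flatMap of the target lists)
theorem pv_supported_eq (se : List (String × List String)) (s0 : PySem.Set String) :
    se.foldl (fun s p => p.2.foldl PySem.Set.add s) s0 = PySem.Set.update s0 (se.flatMap Prod.snd) := by
  induction se generalizing s0 with
  | nil => simp [PySem.Set.update]
  | cons p rest ih =>
    simp only [List.foldl_cons, List.flatMap_cons, PySem.Set.update_append]
    exact ih _

-- B's nested edge pass flattens
theorem pv_nested_markIn (se : List (String × List String)) (d : List (String × (Bool × Bool))) :
    se.foldl (fun d p => p.2.foldl pvMarkIn d) d = (se.flatMap Prod.snd).foldl pvMarkIn d := by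
  induction se generalizing d with
  | nil => rfl
  | cons p rest ih => simp only [List.foldl_cons, List.flatMap_cons, List.foldl_append]; exact ih _

theorem pv_markIn_map (S : List String) (t : String) :
    pvMarkIn (S.map (fun c => (c, (true, false)))) t
      = (PySem.Set.add S t).map (fun c => (c, (true, false))) := by
  induction S with
  | nil => rfl
  | cons c S ih =>
    by_cases h : c = t
    · subst h
      simp [pvMarkIn]
    · have hb : (c == t) = false := by simp [h]
      have : PySem.Set.add (c :: S) t = c :: PySem.Set.add S t := by
        simp only [PySem.Set.add_eq_ite, List.mem_cons]
        by_cases ht : t ∈ S <;> simp [ht, Ne.symm h]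
      simp [pvMarkIn, hb, this, ih]

theorem pv_markIn_fold (ts : List String) (S : List String) :
    ts.foldl pvMarkIn (S.map (fun c => (c, (true, false))))
      = (ts.foldl PySem.Set.add S).map (fun c => (c, (true, false))) := by
  induction ts generalizing S with
  | nil => rfl
  | cons t ts ih => simp only [List.foldl_cons, pv_markIn_map]; exact ih _

theorem pv_markOut_map_out (T : List String) (t : String) :
    pvMarkOut (T.map (fun c => (c, (false, true)))) t
      = (PySem.Set.add T t).map (fun c => (c, (false, true))) := by
  induction T with
  | nil => rfl
  | cons c T ih =>
    by_cases h : c = t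
    · subst h
      simp [pvMarkOut]
    · have hb : (c == t) = false := by simp [h]
      have : PySem.Set.add (c :: T) t = c :: PySem.Set.add T t := by
        simp only [PySem.Set.add_eq_ite, List.mem_cons]
        by_cases ht : t ∈ T <;> simp [ht, Ne.symm h]
      simp [pvMarkOut, hb, this, ih]

theorem pv_markOut_in (S : List String) (g : String → Bool) (rest : List (String × (Bool × Bool)))
    (t : String) (ht : t ∈ S) (hS : S.Nodup) :
    pvMarkOut (S.map (fun c => (c, (true, g c))) ++ rest) t
      = S.map (fun c => (c, (true, g c || (c == t)))) ++ rest := by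
  induction S with
  | nil => cases ht
  | cons c S ih =>
    by_cases h : c = t
    · have hb : (c == t) = true := by simp [h]
      have hcS : c ∉ S := (List.nodup_cons.mp hS).1
      have hmap : S.map (fun x => (x, (true, g x || (x == t)))) = S.map (fun x => (x, (true, g x))) := by
        apply List.map_congr_left
        intro x hx
        have hxb : (x == t) = false := by
          have : x ≠ t := fun he => hcS (h.symm ▸ he ▸ hx)
          simp [this]
        simp [hxb]
      simp [pvMarkOut, hb, hmap]
    · have hb : (c == t) = false := by simp [h]
      have ht' : t ∈ S := by
        rcases List.mem_cons.mp ht with he | he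
        · exact absurd he.symm h
        · exact he
      simp [pvMarkOut, hb, ih ht' (List.nodup_cons.mp hS).2]

theorem pv_markOut_pass (l : List String) (g : String → Bool) (rest : List (String × (Bool × Bool)))
    (t : String) (ht : t ∉ l) :
    pvMarkOut (l.map (fun c => (c, (true, g c))) ++ rest) t
      = l.map (fun c => (c, (true, g c))) ++ pvMarkOut rest t := by
  induction l with
  | nil => rfl
  | cons c l ih =>
    have hb : (c == t) = false := by
      have : c ≠ t := fun he => ht (he ▸ List.mem_cons_self)
      simp [this]
    simp [pvMarkOut, hb, ih (fun h => ht (List.mem_cons_of_mem _ h))]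

theorem pv_markOut_fold (ks : List String) (S : List String) (hS : S.Nodup) :
    ∀ (T : List String) (g : String → Bool),
    ks.foldl pvMarkOut (S.map (fun c => (c, (true, g c))) ++ T.map (fun c => (c, (false, true))))
      = S.map (fun c => (c, (true, g c || PySem.Set.contains ks c)))
        ++ (ks.foldl (fun t k => if PySem.Set.contains S k then t else PySem.Set.add t k) T).map
            (fun c => (c, (false, true))) := by
  induction ks with
  | nil => intro T g; simp [PySem.Set.contains]
  | cons k ks ih =>
    intro T g
    by_cases hk : k ∈ S
    · have hkS : PySem.Set.contains S k = true := (PySem.Set.contains_iff S k).mpr hk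
      rw [List.foldl_cons, pv_markOut_in S g _ k hk hS, ih T (fun c => g c || (c == k))]
      rw [List.foldl_cons]
      simp only [hkS, if_true]
      congr 1
      apply List.map_congr_left
      intro c _
      by_cases hck : c = k
      · have hcb : (c == k) = true := by simp [hck]
        simp [PySem.Set.contains, hck]
      · have hcb : (c == k) = false := by simp [hck]
        simp [PySem.Set.contains, hcb, hck]
    · have hkS : PySem.Set.contains S k = false := by
        simp [hk]
      rw [List.foldl_cons, pv_markOut_pass S g _ k hk, pv_markOut_map_out, ih (PySem.Set.add T k) g]
      rw [List.foldl_cons]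
      simp only [hkS, Bool.false_eq_true, if_false]
      congr 1
      apply List.map_congr_left
      intro c hc
      have hck : ¬ c = k := fun he => hk (he ▸ hc)
      simp [PySem.Set.contains, hck]

-- filter distributes over a Set.add-fold
theorem pv_filter_foldl_add (p : String → Bool) (ks : List String) (u : List String) :
    (ks.foldl PySem.Set.add u).filter p
      = ks.foldl (fun t k => if p k then PySem.Set.add t k else t) (u.filter p) := by
  induction ks generalizing u with
  | nil => rfl
  | cons k ks ih =>
    have hstep : (PySem.Set.add u k).filter p
        = if p k then PySem.Set.add (u.filter p) k else u.filter p := by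
      by_cases hu : k ∈ u
      · rw [PySem.Set.add_of_mem hu]
        by_cases hp : p k = true
        · have hkf : k ∈ u.filter p := List.mem_filter.mpr ⟨hu, hp⟩
          rw [if_pos hp, PySem.Set.add_of_mem hkf]
        · rw [if_neg hp]
      · rw [PySem.Set.add_of_not_mem hu, List.filter_append]
        by_cases hp : p k = true
        · have hkf : k ∉ u.filter p := fun h => hu (List.mem_filter.mp h).1
          rw [if_pos hp, PySem.Set.add_of_not_mem hkf]
          simp [hp]
        · rw [if_neg hp]
          simp [Bool.eq_false_iff.mpr hp]
    simp only [List.foldl_cons, ih, hstep]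

-- the skip-fold used by markOut/ensure is a filtered set-of
theorem pv_skipfold (Sc : String → Bool) (ks : List String) :
    ks.foldl (fun t k => if Sc k then t else PySem.Set.add t k) []
      = (PySem.Set.ofList ks).filter (fun c => !Sc c) := by
  have hfn : (fun (t : List String) k => if Sc k then t else PySem.Set.add t k)
      = (fun t k => if (!Sc k) then PySem.Set.add t k else t) := by
    funext t k
    by_cases h : Sc k = true <;> simp [h]
  rw [hfn, PySem.Set.ofList_eq_foldl, pv_filter_foldl_add]
  rfl

theorem pv_ensure_fold (is : List String) (d : List (String × (Bool × Bool))) :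
    ∀ (T : List String), (∀ x ∈ T, x ∉ d.map Prod.fst) →
    is.foldl pvEnsure (d ++ T.map (fun c => (c, (false, false))))
      = d ++ (is.foldl (fun t k => if PySem.Set.contains (d.map Prod.fst) k then t else PySem.Set.add t k) T).map
          (fun c => (c, (false, false))) := by
  induction is with
  | nil => intro T _; rfl
  | cons i is ih =>
    intro T hT
    have hkeys : (d ++ T.map (fun c => (c, (false, false)))).map Prod.fst = d.map Prod.fst ++ T := by
      simp [List.map_append, List.map_map, Function.comp_def]
    by_cases hd : i ∈ d.map Prod.fst
    · have h1 : PySem.Set.contains (d.map Prod.fst) i = true := (PySem.Set.contains_iff _ i).mpr hd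
      have h2 : pvEnsure (d ++ T.map (fun c => (c, (false, false)))) i
          = d ++ T.map (fun c => (c, (false, false))) := by
        simp only [pvEnsure, hkeys]
        simp [hd]
      simp only [List.foldl_cons, h1, if_true, h2]
      exact ih T hT
    · have h1 : PySem.Set.contains (d.map Prod.fst) i = false := by
        simp [hd]
      by_cases hiT : i ∈ T
      · have h2 : pvEnsure (d ++ T.map (fun c => (c, (false, false)))) i
            = d ++ T.map (fun c => (c, (false, false))) := by
          simp only [pvEnsure, hkeys]
          simp [hiT]
        simp only [List.foldl_cons, h1, Bool.false_eq_true, if_false, h2,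
          PySem.Set.add_of_mem hiT]
        exact ih T hT
      · have h2 : pvEnsure (d ++ T.map (fun c => (c, (false, false)))) i
            = d ++ (T ++ [i]).map (fun c => (c, (false, false))) := by
          simp only [pvEnsure, hkeys]
          simp [hd, hiT, List.append_assoc]
        simp only [List.foldl_cons, h1, Bool.false_eq_true, if_false, h2,
          PySem.Set.add_of_not_mem hiT]
        apply ih
        intro x hx
        rcases List.mem_append.mp hx with h | h
        · exact hT x h
        · simp only [List.mem_singleton] at h; exact h ▸ hd

-- B's classification loop over per-node flag records, described by three filters
theorem pv_foldB (ac : List (String × List (String × String))) (pS pK : String → Bool)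
    (U r l i : List String) (hU : U.Nodup) (hd : ∀ c ∈ U, c ∉ r ∧ c ∉ l ∧ c ∉ i) :
    (U.map (fun c => (c, (pS c, pK c)))).foldl (fun acc e =>
      if e.2.1 && !e.2.2 then (PySem.Set.add acc.1 e.1, acc.2.1, acc.2.2)
      else if e.2.2 && !e.2.1 then (acc.1, PySem.Set.add acc.2.1 e.1, acc.2.2)
      else if !e.2.1 && !e.2.2 then
        ((if pvClaimTyped ac e.1 then PySem.Set.add acc.1 e.1 else acc.1), acc.2.1,
          PySem.Set.add acc.2.2 e.1)
      else acc) (r, l, i)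
    = (r ++ U.filter (fun c => (pS c && !pK c) || (!pS c && !pK c && pvClaimTyped ac c)),
       l ++ U.filter (fun c => pK c && !pS c),
       i ++ U.filter (fun c => !pS c && !pK c)) := by
  induction U generalizing r l i with
  | nil => simp
  | cons c U ih =>
    obtain ⟨hr, hl, hi⟩ := hd c (List.mem_cons_self)
    have hU' := hU.of_cons
    have hcU : c ∉ U := (List.nodup_cons.mp hU).1
    have hadd_r : PySem.Set.add r c = r ++ [c] := PySem.Set.add_of_not_mem hr
    have hadd_l : PySem.Set.add l c = l ++ [c] := PySem.Set.add_of_not_mem hl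
    have hadd_i : PySem.Set.add i c = i ++ [c] := PySem.Set.add_of_not_mem hi
    have hd' : ∀ x ∈ U, (x ∉ r ++ [c]) ∧ (x ∉ l ++ [c]) ∧ (x ∉ i ++ [c]) := by
      intro x hx
      have hxr := hd x (List.mem_cons_of_mem _ hx)
      have hne : x ≠ c := fun h => hcU (h ▸ hx)
      simp [hxr.1, hxr.2.1, hxr.2.2, hne]
    have hd'' : ∀ x ∈ U, x ∉ r ∧ x ∉ l ∧ x ∉ i := fun x hx =>
      hd x (List.mem_cons_of_mem _ hx)
    by_cases hS : pS c = true <;>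
      by_cases hK : pK c = true <;>
        by_cases hty : pvClaimTyped ac c = true <;>
          simp only [List.map_cons, List.foldl_cons, List.filter_cons, hS, hK, hty, Bool.not_true,
            Bool.not_false, Bool.and_true, Bool.and_false,
            Bool.false_or, Bool.or_false, if_true, if_false, hadd_r, hadd_l,
            hadd_i, Bool.false_eq_true] <;>
          (rw [ih _ _ _ hU' (by
              intro x hx
              obtain ⟨h1, h2, h3⟩ := hd' x hx
              obtain ⟨g1, g2, g3⟩ := hd'' x hx
              exact ⟨by assumption, by assumption, by assumption⟩)]
           try simp)

-- ===== VERDICT (by name: the statement is the Claim_ definition above) =====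
theorem find_roots_and_leaves_spec : Claim_equal_find_roots_and_leaves := by
  intro ac se _ _
  unfold Spec_find_roots_and_leaves find_roots_and_leaves find_roots_and_leaves_alt
  rw [pv_supported_eq, show (PySem.Set.empty : PySem.Set String) = [] from rfl,
    PySem.Set.update_nil_left, pv_nested_markIn]
  set S : List String := PySem.Set.ofList (se.flatMap Prod.snd) with hSdef
  set K : List String := PySem.Set.ofList (se.map Prod.fst) with hKdef
  set I : List String := PySem.Set.ofList (ac.map Prod.fst) with hIdef
  have hSn : S.Nodup := PySem.Set.nodup_ofList _
  have hKn : K.Nodup := PySem.Set.nodup_ofList _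
  have hIn : I.Nodup := PySem.Set.nodup_ofList _
  set pS : String → Bool := PySem.Set.contains S with hpS
  set pK : String → Bool := PySem.Set.contains K with hpK
  -- B's first pass: the flag dict after the edge scan is S with (true, false) records
  have hflags1 : (se.flatMap Prod.snd).foldl pvMarkIn ([] : List (String × (Bool × Bool)))
      = S.map (fun c => (c, (true, false))) := by
    rw [show ([] : List (String × (Bool × Bool))) = ([] : List String).map (fun c => (c, (true, false))) from rfl,
      pv_markIn_fold, hSdef, PySem.Set.ofList_eq_foldl]
  -- B's second pass: out-flags are set, new supporter-only records appended
  have hflags2 := pv_markOut_fold (se.map Prod.fst) S hSn [] (fun _ => false)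
  simp only [List.map_nil, List.append_nil, Bool.false_or] at hflags2
  set Kf : List String := K.filter (fun c => !pS c) with hKfdef
  have hTk : (se.map Prod.fst).foldl
      (fun t k => if PySem.Set.contains S k then t else PySem.Set.add t k) [] = Kf := by
    rw [pv_skipfold, ← hKdef, hKfdef, hpS]
  rw [hTk] at hflags2
  -- B's third pass: isolated records appended
  set d2 : List (String × (Bool × Bool)) :=
    S.map (fun c => (c, (true, PySem.Set.contains (se.map Prod.fst) c)))
      ++ Kf.map (fun c => (c, (false, true))) with hd2def
  have hkeys2 : d2.map Prod.fst = S ++ Kf := by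
    simp [hd2def, List.map_append, List.map_map, Function.comp_def]
  have hflags3 := pv_ensure_fold (ac.map Prod.fst) d2 [] (by simp)
  simp only [List.map_nil, List.append_nil, hkeys2] at hflags3
  set If : List String := I.filter (fun c => !pS c && !pK c) with hIfdef
  have hTi : (ac.map Prod.fst).foldl
      (fun t k => if PySem.Set.contains (S ++ Kf) k then t else PySem.Set.add t k) [] = If := by
    rw [pv_skipfold, ← hIdef, hIfdef]
    apply List.filter_congr
    intro c _
    by_cases hcS : c ∈ S
    · have h1 : PySem.Set.contains (S ++ Kf) c = true :=
        (PySem.Set.contains_iff _ c).mpr (List.mem_append.mpr (Or.inl hcS))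
      have h2 : pS c = true := (PySem.Set.contains_iff S c).mpr hcS
      rw [h1, h2]
      simp
    · have h2 : pS c = false := by rw [hpS]; simp [hcS]
      by_cases hcK : c ∈ K
      · have h3 : pK c = true := (PySem.Set.contains_iff K c).mpr hcK
        have hcKf : c ∈ Kf := List.mem_filter.mpr ⟨hcK, by simp [h2]⟩
        have h1 : PySem.Set.contains (S ++ Kf) c = true :=
          (PySem.Set.contains_iff _ c).mpr (List.mem_append.mpr (Or.inr hcKf))
        rw [h1, h2, h3]
        simp
      · have h3 : pK c = false := by rw [hpK]; simp [hcK]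
        have h1 : PySem.Set.contains (S ++ Kf) c = false := by
          cases hx : PySem.Set.contains (S ++ Kf) c
          · rfl
          · exfalso
            have hmem : c ∈ S ++ Kf := (PySem.Set.contains_iff _ c).mp hx
            rcases List.mem_append.mp hmem with h | h
            · exact hcS h
            · exact hcK (List.mem_filter.mp h).1
        rw [h1, h2, h3]
        simp
  rw [hTi] at hflags3
  -- the finished flag dict is the union list with each id's own (pS, pK) record
  have hseg1 : S.map (fun c => (c, (true, PySem.Set.contains (se.map Prod.fst) c)))
      = S.map (fun c => (c, (pS c, pK c))) := by
    apply List.map_congr_left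
    intro c hc
    have h1 : pS c = true := (PySem.Set.contains_iff S c).mpr hc
    have h2 : PySem.Set.contains (se.map Prod.fst) c = pK c := by
      rw [Bool.eq_iff_iff, hpK]
      simp [hKdef, PySem.Set.mem_ofList]
    rw [h1, h2]
  have hseg2 : Kf.map (fun c => (c, (false, true))) = Kf.map (fun c => (c, (pS c, pK c))) := by
    apply List.map_congr_left
    intro c hc
    have h1 := List.mem_filter.mp hc
    have h2 : pK c = true := (PySem.Set.contains_iff K c).mpr h1.1
    have h3 : pS c = false := by
      have := h1.2
      cases hx : pS c
      · rfl
      · rw [hx] at this; simp at this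
    rw [h2, h3]
  have hseg3 : If.map (fun c => (c, (false, false))) = If.map (fun c => (c, (pS c, pK c))) := by
    apply List.map_congr_left
    intro c hc
    have h1 := List.mem_filter.mp hc
    have h2 : pS c = false := by
      have := h1.2
      cases hx : pS c
      · rfl
      · rw [hx] at this; simp at this
    have h3 : pK c = false := by
      have := h1.2
      cases hx : pK c
      · rfl
      · rw [hx] at this; simp at this
    rw [h2, h3]
  have hflags : (ac.map Prod.fst).foldl pvEnsure
        ((se.map Prod.fst).foldl pvMarkOut ((se.flatMap Prod.snd).foldl pvMarkIn []))
      = (S ++ Kf ++ If).map (fun c => (c, (pS c, pK c))) := by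
    rw [hflags1, hflags2, hflags3, hd2def, hseg1, hseg2, hseg3, ← List.map_append,
      ← List.map_append]
  rw [hflags]
  -- nodup of the union list
  have hdisj1 : ∀ c ∈ Kf, c ∉ S := by
    intro c hc
    have h1 := (List.mem_filter.mp hc).2
    intro hcs
    rw [show pS c = true from (PySem.Set.contains_iff S c).mpr hcs] at h1
    simp at h1
  have hdisj2 : ∀ c ∈ If, c ∉ S := by
    intro c hc
    have h1 := (List.mem_filter.mp hc).2
    intro hcs
    rw [show pS c = true from (PySem.Set.contains_iff S c).mpr hcs] at h1
    simp at h1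
  have hdisj3 : ∀ c ∈ If, c ∉ Kf := by
    intro c hc hck
    have h1 := (List.mem_filter.mp hc).2
    have h2 := (List.mem_filter.mp hck).1
    rw [show pK c = true from (PySem.Set.contains_iff K c).mpr h2] at h1
    simp at h1
  have hUn : (S ++ Kf ++ If).Nodup := by
    have h12 : (S ++ Kf).Nodup := by
      refine List.Nodup.append hSn (hKn.filter _) ?_
      intro a ha hb
      exact hdisj1 a hb ha
    refine List.Nodup.append h12 (hIn.filter _) ?_
    intro a ha hb
    rcases List.mem_append.mp ha with h | h
    · exact hdisj2 a hb h
    · exact hdisj3 a hb h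
  rw [pv_foldB ac pS pK (S ++ Kf ++ If) [] [] [] hUn (by simp)]
  simp only [List.nil_append, List.filter_append]
  -- A's side: identify each component
  have hrfilter : ∀ P : String → Bool, Kf.filter P = K.filter (fun c => P c && !pS c) := by
    intro P
    rw [hKfdef, List.filter_filter]
  have hifilter : ∀ P : String → Bool, If.filter P = I.filter (fun c => P c && (!pS c && !pK c)) := by
    intro P
    rw [hIfdef, List.filter_filter]
  rw [hrfilter, hrfilter, hrfilter, hifilter, hifilter, hifilter]
  have hseg1R : S.filter (fun c => (pS c && !pK c) || (!pS c && !pK c && pvClaimTyped ac c))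
      = PySem.Set.diff S K := by
    rw [PySem.Set.diff]
    apply List.filter_congr
    intro c hc
    have h1 : pS c = true := (PySem.Set.contains_iff S c).mpr hc
    simp [h1, hpK, PySem.Set.contains]
  have hseg2R : K.filter (fun c => ((pS c && !pK c) || (!pS c && !pK c && pvClaimTyped ac c)) && !pS c) = [] := by
    rw [List.filter_eq_nil_iff]
    intro c hc
    have h1 : pK c = true := (PySem.Set.contains_iff K c).mpr hc
    simp [h1]
  have hseg3R : I.filter (fun c => ((pS c && !pK c) || (!pS c && !pK c && pvClaimTyped ac c)) && (!pS c && !pK c))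
      = ((PySem.Set.diff (PySem.Set.diff I S) K).filter fun cid => pvClaimTyped ac cid) := by
    simp only [PySem.Set.diff, List.filter_filter]
    apply List.filter_congr
    intro c _
    show _ = (pvClaimTyped ac c && (!List.contains K c && !List.contains S c))
    rw [show List.contains K c = pK c from rfl, show List.contains S c = pS c from rfl]
    cases pS c <;> cases pK c <;> cases pvClaimTyped ac c <;> rfl
  have hunref_nodup : (PySem.Set.diff (PySem.Set.diff I S) K).Nodup :=
    PySem.Set.nodup_diff _ _ (PySem.Set.nodup_diff _ _ hIn)
  have hrootsA : (if (PySem.Set.diff (PySem.Set.diff I S) K).isEmpty then PySem.Set.diff S K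
        else PySem.Set.update (PySem.Set.diff S K)
          ((PySem.Set.diff (PySem.Set.diff I S) K).filter fun cid => pvClaimTyped ac cid))
      = PySem.Set.diff S K ++ ((PySem.Set.diff (PySem.Set.diff I S) K).filter fun cid => pvClaimTyped ac cid) := by
    by_cases hemp : (PySem.Set.diff (PySem.Set.diff I S) K).isEmpty
    · rw [if_pos hemp]
      rw [List.isEmpty_iff] at hemp
      simp [hemp]
    · rw [if_neg hemp]
      apply PySem.Set.update_eq_append_of_disjoint
      · exact hunref_nodup.filter _
      · intro x hx
        have hxu := List.mem_of_mem_filter hx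
        have hxS : x ∉ S := by
          have := (PySem.Set.mem_diff _ _ _).mp ((PySem.Set.mem_diff _ _ _).mp hxu).1
          exact this.2
        intro hmem
        exact hxS ((PySem.Set.mem_diff _ _ _).mp hmem).1
  have hseg1L : S.filter (fun c => pK c && !pS c) = [] := by
    rw [List.filter_eq_nil_iff]
    intro c hc
    have h1 : pS c = true := (PySem.Set.contains_iff S c).mpr hc
    simp [h1]
  have hseg2L : K.filter (fun c => (pK c && !pS c) && !pS c) = PySem.Set.diff K S := by
    rw [PySem.Set.diff]
    apply List.filter_congr
    intro c hc
    have h1 : pK c = true := (PySem.Set.contains_iff K c).mpr hc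
    simp [h1, hpS, PySem.Set.contains, Bool.and_self]
  have hseg3L : I.filter (fun c => (pK c && !pS c) && (!pS c && !pK c)) = [] := by
    rw [List.filter_eq_nil_iff]
    intro c _
    cases pS c <;> cases pK c <;> simp
  have hseg1I : S.filter (fun c => (!pS c && !pK c)) = [] := by
    rw [List.filter_eq_nil_iff]
    intro c hc
    have h1 : pS c = true := (PySem.Set.contains_iff S c).mpr hc
    simp [h1]
  have hseg2I : K.filter (fun c => (!pS c && !pK c) && !pS c) = [] := by
    rw [List.filter_eq_nil_iff]
    intro c hc
    have h1 : pK c = true := (PySem.Set.contains_iff K c).mpr hc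
    simp [h1]
  have hseg3I : I.filter (fun c => (!pS c && !pK c) && (!pS c && !pK c))
      = PySem.Set.diff (PySem.Set.diff I S) K := by
    simp only [PySem.Set.diff, List.filter_filter]
    apply List.filter_congr
    intro c _
    show _ = (!List.contains K c && !List.contains S c)
    rw [show List.contains K c = pK c from rfl, show List.contains S c = pS c from rfl]
    cases pS c <;> cases pK c <;> rfl
  rw [hseg1R, hseg2R, hseg3R, hseg1L, hseg2L, hseg3L, hseg1I, hseg2I, hseg3I, hrootsA]
  simp
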